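-- pv_equiv track=rewrite | github.com/jameshyojaelee/AbProp | scripts/build_cdr_gold_standard.py | create_cdr_masks
-- ===== SOURCE A (Python) =====
-- from typing import Dict, List, Optional, Tuple
--
-- CHOTHIA_CDR_DEFINITIONS = {
--     "H": {  # Heavy chain
--         "CDR1": (26, 32),  # Chothia H1: 26-32
--         "CDR2": (52, 56),  # Chothia H2: 52-56
--         "CDR3": (95, 102), # Chothia H3: 95-102 (variable length)
--     },
--     "L": {  # Light chain (kappa/lambda)
--         "CDR1": (24, 34),  # Chothia L1: 24-34
--         "CDR2": (50, 56),  # Chothia L2: 50-56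
--         "CDR3": (89, 97),  # Chothia L3: 89-97
--     }
-- }
--
-- KABAT_CDR_DEFINITIONS = {
--     "H": {
--         "CDR1": (31, 35),  # Kabat H1: 31-35 (up to 35B in insertions)
--         "CDR2": (50, 65),  # Kabat H2: 50-65
--         "CDR3": (95, 102), # Kabat H3: 95-102
--     },
--     "L": {
--         "CDR1": (24, 34),  # Kabat L1: 24-34
--         "CDR2": (50, 56),  # Kabat L2: 50-56
--         "CDR3": (89, 97),  # Kabat L3: 89-97
--     }
-- }
--
-- IMGT_CDR_DEFINITIONS = {
--     "H": {
--         "CDR1": (27, 38),  # IMGT H1: 27-38 (IMGT positions)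
--         "CDR2": (56, 65),  # IMGT H2: 56-65
--         "CDR3": (105, 117), # IMGT H3: 105-117 (variable)
--     },
--     "L": {
--         "CDR1": (27, 38),  # IMGT L1: 27-38
--         "CDR2": (56, 65),  # IMGT L2: 56-65
--         "CDR3": (105, 117), # IMGT L3: 105-117
--     }
-- }
--
-- def create_cdr_masks(
--     numbered_sequence: List[Tuple[int, str]],
--     chain: str,
--     schemes: List[str] = ["chothia", "kabat", "imgt"]
-- ) -> Dict[str, List[int]]:
--     """
--     Create CDR masks for different numbering schemes.
--
--     Args:
--         numbered_sequence: List of (position, residue) tuples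
--         chain: H or L
--         schemes: List of schemes to generate
--
--     Returns:
--         Dictionary mapping scheme name to CDR mask
--     """
--     masks = {}
--
--     scheme_defs = {
--         "chothia": CHOTHIA_CDR_DEFINITIONS,
--         "kabat": KABAT_CDR_DEFINITIONS,
--         "imgt": IMGT_CDR_DEFINITIONS,
--     }
--
--     for scheme in schemes:
--         if scheme not in scheme_defs:
--             continue
--
--         cdr_def = scheme_defs[scheme].get(chain, {})
--         mask = []
--
--         for pos, residue in numbered_sequence:
--             is_cdr = False
--
--             # Check if position falls in any CDR
--             for cdr_name, (start, end) in cdr_def.items():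
--                 if start <= pos <= end:
--                     is_cdr = True
--                     break
--
--             mask.append(1 if is_cdr else 0)
--
--         masks[scheme] = mask
--
--     return masks
-- ===== SOURCE B (Python) =====
-- CHOTHIA_CDR_DEFINITIONS = {
--     "H": {"CDR1": (26, 32), "CDR2": (52, 56), "CDR3": (95, 102)},
--     "L": {"CDR1": (24, 34), "CDR2": (50, 56), "CDR3": (89, 97)},
-- }
--
-- KABAT_CDR_DEFINITIONS = {
--     "H": {"CDR1": (31, 35), "CDR2": (50, 65), "CDR3": (95, 102)},
--     "L": {"CDR1": (24, 34), "CDR2": (50, 56), "CDR3": (89, 97)},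
-- }
--
-- IMGT_CDR_DEFINITIONS = {
--     "H": {"CDR1": (27, 38), "CDR2": (56, 65), "CDR3": (105, 117)},
--     "L": {"CDR1": (27, 38), "CDR2": (56, 65), "CDR3": (105, 117)},
-- }
--
-- _SCHEME_DEFS = {
--     "chothia": CHOTHIA_CDR_DEFINITIONS,
--     "kabat": KABAT_CDR_DEFINITIONS,
--     "imgt": IMGT_CDR_DEFINITIONS,
-- }
--
--
-- def _mask_for(scheme, chain, positions):
--     covered = set()
--     for start, end in _SCHEME_DEFS[scheme].get(chain, {}).values():
--         covered.update(range(start, end + 1))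
--     return [1 if p in covered else 0 for p in positions]
--
--
-- def create_cdr_masks(numbered_sequence, chain, schemes=["chothia", "kabat", "imgt"]):
--     positions = [pos for pos, _ in numbered_sequence]
--     order = list(dict.fromkeys(s for s in schemes if s in _SCHEME_DEFS))
--     return {s: _mask_for(s, chain, positions) for s in order}
-- ===== Notes on version B (the rewrite author's own statement) =====
-- stated objective: simpler
-- what changed: B replaces A's dict-building fold with per-position inner scan over the CDR ranges by a staged pipeline: filter-and-dedup the valid scheme names once, precompute each scheme's set of covered positions in one pass over the ranges, and emit each mask as a single membership-test map over the position list.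
import Mathlib
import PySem

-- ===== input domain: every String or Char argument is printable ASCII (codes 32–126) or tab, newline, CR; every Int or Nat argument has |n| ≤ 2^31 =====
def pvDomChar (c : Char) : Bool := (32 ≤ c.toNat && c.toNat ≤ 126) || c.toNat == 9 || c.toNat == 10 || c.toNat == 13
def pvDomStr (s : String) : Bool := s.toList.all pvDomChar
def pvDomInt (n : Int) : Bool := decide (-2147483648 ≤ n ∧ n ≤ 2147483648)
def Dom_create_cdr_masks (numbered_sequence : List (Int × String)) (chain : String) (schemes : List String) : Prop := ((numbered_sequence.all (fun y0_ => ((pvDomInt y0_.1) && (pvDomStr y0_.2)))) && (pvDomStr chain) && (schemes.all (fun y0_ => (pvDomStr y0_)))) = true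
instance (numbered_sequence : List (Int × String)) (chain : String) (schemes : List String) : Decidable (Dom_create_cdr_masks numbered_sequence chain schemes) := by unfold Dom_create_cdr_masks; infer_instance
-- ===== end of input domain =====

-- B deduplicates the valid schemes first and maps each to its mask, computed by one membership pass over a precomputed set of CDR positions (simpler: no per-position range scan, no dict fold).


-- ===== PORT A =====
-- the module-level CDR-definition dicts (shared data, used by both ports)
def pvChothia : PySem.Dict String (PySem.Dict String (Int × Int)) :=
  PySem.Dict.ofList
    [("H", PySem.Dict.ofList [("CDR1", (26, 32)), ("CDR2", (52, 56)), ("CDR3", (95, 102))]),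
     ("L", PySem.Dict.ofList [("CDR1", (24, 34)), ("CDR2", (50, 56)), ("CDR3", (89, 97))])]

def pvKabat : PySem.Dict String (PySem.Dict String (Int × Int)) :=
  PySem.Dict.ofList
    [("H", PySem.Dict.ofList [("CDR1", (31, 35)), ("CDR2", (50, 65)), ("CDR3", (95, 102))]),
     ("L", PySem.Dict.ofList [("CDR1", (24, 34)), ("CDR2", (50, 56)), ("CDR3", (89, 97))])]

def pvImgt : PySem.Dict String (PySem.Dict String (Int × Int)) :=
  PySem.Dict.ofList
    [("H", PySem.Dict.ofList [("CDR1", (27, 38)), ("CDR2", (56, 65)), ("CDR3", (105, 117))]),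
     ("L", PySem.Dict.ofList [("CDR1", (27, 38)), ("CDR2", (56, 65)), ("CDR3", (105, 117))])]

-- the scheme_defs / _SCHEME_DEFS table (same data in both Pythons)
def pvSchemeTable : PySem.Dict String (PySem.Dict String (PySem.Dict String (Int × Int))) :=
  PySem.Dict.ofList [("chothia", pvChothia), ("kabat", pvKabat), ("imgt", pvImgt)]

-- A's inner 'for cdr_name, (start, end) in cdr_def.items(): if start <= pos <= end: is_cdr = True; break'
def pvACheck (items : List (String × Int × Int)) (pos : Int) : Bool :=
  match items with
  | [] => false
  | (_, se) :: rest => if se.1 ≤ pos ∧ pos ≤ se.2 then true else pvACheck rest pos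

def create_cdr_masks (numbered_sequence : List (Int × String)) (chain : String) (schemes : List String) : List (String × List Int) :=
  (schemes.foldl (fun masks scheme =>
      match PySem.Dict.get? pvSchemeTable scheme with
      | none => masks                              -- 'if scheme not in scheme_defs: continue'
      | some defs =>
        let cdr_def := PySem.Dict.getD defs chain PySem.Dict.empty
        let mask := numbered_sequence.foldl
          (fun m p => m ++ [if pvACheck cdr_def.items p.1 then (1 : Int) else 0]) []
        PySem.Dict.insert masks scheme mask)
    PySem.Dict.empty).items

-- ===== PORT B =====
-- B's helper _mask_for(scheme, chain, positions)
def pvMaskFor (scheme : String) (chain : String) (positions : List Int) : List Int :=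
  let covered : PySem.Set Int :=
    (PySem.Dict.values
        (PySem.Dict.getD (PySem.Dict.getD pvSchemeTable scheme PySem.Dict.empty) chain PySem.Dict.empty)).foldl
      (fun s se => PySem.Set.update s (PySem.List.pyRange se.1 (se.2 + 1) 1)) PySem.Set.empty
  positions.map (fun p => if PySem.Set.contains covered p then (1 : Int) else 0)

def create_cdr_masks_alt (numbered_sequence : List (Int × String)) (chain : String) (schemes : List String) : List (String × List Int) :=
  let positions := numbered_sequence.map (fun p => p.1)
  let order := PySem.List.dedup (schemes.filter (fun s => PySem.Dict.contains pvSchemeTable s))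
  -- the dict comprehension '{s: _mask_for(...) for s in order}' over distinct keys: its items ARE this map
  order.map (fun s => (s, pvMaskFor s chain positions))

-- ===== PRECONDITION & SPEC =====
def Spec_create_cdr_masks (numbered_sequence : List (Int × String)) (chain : String) (schemes : List String) (out : List (String × List Int)) : Prop := out = create_cdr_masks_alt numbered_sequence chain schemes
instance (numbered_sequence : List (Int × String)) (chain : String) (schemes : List String) (out : List (String × List Int)) : Decidable (Spec_create_cdr_masks numbered_sequence chain schemes out) := by unfold Spec_create_cdr_masks; infer_instance

-- ===== CLAIM (what is proved, stated in full; the proofs are below) =====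
def Claim_equal_create_cdr_masks : Prop := ∀ (numbered_sequence : List (Int × String)) (chain : String) (schemes : List String), Dom_create_cdr_masks numbered_sequence chain schemes → Spec_create_cdr_masks numbered_sequence chain schemes (create_cdr_masks numbered_sequence chain schemes)

-- ===== LEMMAS AND PROOFS =====

-- A's mask for one scheme, as a function of the scheme name only (proof device)
def pvF (numbered_sequence : List (Int × String)) (chain : String) (s : String) : List Int :=
  numbered_sequence.foldl
    (fun m p => m ++ [if pvACheck (PySem.Dict.getD (PySem.Dict.getD pvSchemeTable s PySem.Dict.empty) chain PySem.Dict.empty).items p.1 then (1 : Int) else 0]) []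

-- A's break-scan over the (name, (start, end)) items is an existence test over the ranges
theorem pvACheck_eq_any (items : List (String × Int × Int)) (pos : Int) :
    pvACheck items pos = items.any (fun it => decide (it.2.1 ≤ pos ∧ pos ≤ it.2.2)) := by
  induction items with
  | nil => rfl
  | cons hd tl ih =>
    simp only [pvACheck, List.any_cons, ih]
    by_cases h : hd.2.1 ≤ pos ∧ pos ≤ hd.2.2 <;> simp [h]

-- membership in B's accumulated position set
theorem mem_fold_update (l : List (Int × Int)) (s : PySem.Set Int) (p : Int) :
    p ∈ l.foldl (fun s se => PySem.Set.update s (PySem.List.pyRange se.1 (se.2 + 1) 1)) s ↔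
    p ∈ s ∨ ∃ se ∈ l, se.1 ≤ p ∧ p ≤ se.2 := by
  induction l generalizing s with
  | nil => simp
  | cons hd tl ih =>
    simp only [List.foldl_cons, ih, PySem.Set.mem_update, PySem.List.mem_pyRange_one]
    constructor
    · rintro (⟨h | h⟩ | h)
      · exact Or.inl h
      · exact Or.inr ⟨hd, List.mem_cons_self .., by omega⟩
      · obtain ⟨se, hm, hb⟩ := h; exact Or.inr ⟨se, List.mem_cons_of_mem _ hm, hb⟩
    · rintro (h | ⟨se, hm, hb⟩)
      · exact Or.inl (Or.inl h)
      · rcases List.mem_cons.mp hm with rfl | hm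
        · exact Or.inl (Or.inr (by omega))
        · exact Or.inr ⟨se, hm, hb⟩

-- the per-position tests agree, for any cdr_def dict and position
theorem check_eq_contains (d : PySem.Dict String (Int × Int)) (p : Int) :
    pvACheck d.items p =
      PySem.Set.contains
        ((PySem.Dict.values d).foldl
          (fun s se => PySem.Set.update s (PySem.List.pyRange se.1 (se.2 + 1) 1))
          PySem.Set.empty) p := by
  rw [pvACheck_eq_any]
  rcases h : PySem.Set.contains
        ((PySem.Dict.values d).foldl
          (fun s se => PySem.Set.update s (PySem.List.pyRange se.1 (se.2 + 1) 1))
          PySem.Set.empty) p with _ | _ <;> rw [h]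
  · rw [List.any_eq_false]
    intro it hit hp
    have : p ∈ (PySem.Dict.values d).foldl
        (fun s se => PySem.Set.update s (PySem.List.pyRange se.1 (se.2 + 1) 1))
        PySem.Set.empty := by
      rw [mem_fold_update]
      exact Or.inr ⟨it.2, List.mem_map_of_mem hit, by simpa using hp⟩
    have hc := (PySem.Set.contains_iff _ p).mpr this
    simp only [PySem.Set.empty] at h hc
    rw [h] at hc
    exact absurd hc (by simp)
  · have hp := (PySem.Set.contains_iff _ _).mp h
    rw [mem_fold_update] at hp
    rcases hp with hp | ⟨se, hm, hb⟩
    · simp [PySem.Set.empty] at hp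
    · obtain ⟨it, hit, rfl⟩ := List.mem_map.mp hm
      exact List.any_eq_true.mpr ⟨it, hit, by simpa using hb⟩

-- A's per-scheme mask equals B's _mask_for
theorem pvF_eq_maskFor (ns : List (Int × String)) (chain : String) (s : String) :
    pvF ns chain s = pvMaskFor s chain (ns.map (fun p => p.1)) := by
  unfold pvF pvMaskFor
  rw [PySem.List.foldl_append_singleton_eq_map, List.map_map]
  apply List.map_congr_left
  intro p _
  simp only [Function.comp_apply]
  rw [check_eq_contains]

-- A's dict-building fold over the scheme list, characterised: it accumulates exactly the
-- first occurrences of the valid scheme names, each paired with its mask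
theorem pvA_fold_items (F : String → List Int) (l : List String) (acc : List String)
    (hacc : acc.Nodup) :
    (l.foldl (fun (m : PySem.Dict String (List Int)) s =>
        match PySem.Dict.get? pvSchemeTable s with
        | none => m
        | some _ => PySem.Dict.insert m s (F s))
      (PySem.Dict.mk (acc.map (fun k => (k, F k))))).items
    = (PySem.Set.update acc (l.filter (fun s => PySem.Dict.contains pvSchemeTable s))).map
        (fun k => (k, F k)) := by
  induction l generalizing acc with
  | nil => simp [PySem.Set.update]
  | cons s tl ih =>
    have hcont : PySem.Dict.contains pvSchemeTable s = (PySem.Dict.get? pvSchemeTable s).isSome :=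
      PySem.Dict.contains_eq_isSome_get? ..
    cases h : PySem.Dict.get? pvSchemeTable s with
    | none =>
      simp only [List.foldl_cons, List.filter_cons, hcont, h, Option.isSome_none]
      exact ih acc hacc
    | some defs =>
      simp only [List.foldl_cons, List.filter_cons, hcont, h, Option.isSome_some, if_true]
      have hkeys : (PySem.Dict.mk (acc.map (fun k => (k, F k)))).keys = acc := by
        simp [PySem.Dict.keys, List.map_map, Function.comp_def]
      have hstep : PySem.Dict.insert (PySem.Dict.mk (acc.map (fun k => (k, F k)))) s (F s)
          = PySem.Dict.mk ((PySem.Set.add acc s).map (fun k => (k, F k))) := by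
        apply PySem.Dict.ext
        by_cases hmem : s ∈ acc
        · rw [PySem.Dict.items_insert_of_contains _ _
            (by rw [PySem.Dict.contains_eq_decide_mem_keys, hkeys]; simpa using hmem)]
          rw [PySem.Set.add_of_mem hmem]
          simp only [List.map_map]
          apply List.map_congr_left
          intro k _
          by_cases hk : k = s <;> simp [hk]
        · rw [PySem.Dict.items_insert_of_not_contains _ _
            (by rw [PySem.Dict.contains_eq_decide_mem_keys, hkeys]; simpa using hmem)]
          rw [PySem.Set.add_of_not_mem hmem]
          simp
      rw [hstep, ih (PySem.Set.add acc s) (PySem.Set.nodup_add acc s hacc), PySem.Set.update_cons]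

-- ===== VERDICT (by name: the statement is the Claim_ definition above) =====
theorem create_cdr_masks_spec : Claim_equal_create_cdr_masks := by
  intro ns chain schemes _
  unfold Spec_create_cdr_masks create_cdr_masks create_cdr_masks_alt
  have hcongr : schemes.foldl (fun masks scheme =>
      match PySem.Dict.get? pvSchemeTable scheme with
      | none => masks
      | some defs =>
        let cdr_def := PySem.Dict.getD defs chain PySem.Dict.empty
        let mask := ns.foldl
          (fun m p => m ++ [if pvACheck cdr_def.items p.1 then (1 : Int) else 0]) []
        PySem.Dict.insert masks scheme mask)
      PySem.Dict.empty
    = schemes.foldl (fun (m : PySem.Dict String (List Int)) s =>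
        match PySem.Dict.get? pvSchemeTable s with
        | none => m
        | some _ => PySem.Dict.insert m s (pvF ns chain s))
      PySem.Dict.empty := by
    apply PySem.List.foldl_congr_mem
    intro m s _
    cases h : PySem.Dict.get? pvSchemeTable s with
    | none => rfl
    | some defs =>
      simp only [pvF, PySem.Dict.getD_of_get?_eq_some pvSchemeTable PySem.Dict.empty h]
  rw [hcongr]
  have := pvA_fold_items (pvF ns chain) schemes [] List.nodup_nil
  simp only [List.map_nil] at this
  rw [show (PySem.Dict.empty : PySem.Dict String (List Int)) = PySem.Dict.mk [] from rfl, this,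
    PySem.Set.update_nil_left, PySem.List.dedup_eq_ofList]
  exact List.map_congr_left (fun s _ => by rw [pvF_eq_maskFor])
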